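-- pv_equiv track=rewrite | github.com/yeongsummer/Algorithm | Python/Programmers/sale_event.py | solution
-- ===== SOURCE A (Python) =====
-- from collections import defaultdict
--
-- def solution(want, number, discount):
--     answer = 0
--     total_count = 0
--     fruits_dict = defaultdict(int)
--
--     for fruit, count in zip(want, number):
--         fruits_dict[fruit] = count
--         total_count += count
--
--     for fruit in discount[:10]:
--         if fruit in fruits_dict:
--             fruits_dict[fruit] -= 1
--             if fruits_dict[fruit] >= 0:
--                 total_count -= 1
--
--     if total_count == 0:
--         answer += 1
--
--     if len(discount) == 10 :
--         return answer
--
--     for i in range(10, len(discount)):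
--         if discount[i] in fruits_dict:
--             fruits_dict[discount[i]] -= 1
--             if fruits_dict[discount[i]] >= 0:
--                 total_count -= 1
--         if discount[i-10] in fruits_dict:
--             fruits_dict[discount[i-10]] += 1
--             if fruits_dict[discount[i-10]] > 0:
--                 total_count += 1
--         if total_count == 0 :
--             answer += 1
--
--     return answer
-- ===== SOURCE B (Python) =====
-- from collections import Counter
--
-- def solution(want, number, discount):
--     pairs = list(zip(want, number))
--     required = {}
--     for fruit, cnt in pairs:
--         required[fruit] = cnt
--     need = sum(cnt for _, cnt in pairs)
--     answer = 0
--     for i in range(len(discount) - 9):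
--         matched = 0
--         for fruit, c in Counter(discount[i:i + 10]).items():
--             if fruit in required:
--                 matched += max(0, min(c, required[fruit]))
--         if matched == need:
--             answer += 1
--     return answer
-- ===== Notes on version B (the rewrite author's own statement) =====
-- stated objective: simpler
-- what changed: B drops A's incremental sliding state (a mutable dict of remaining counts plus a running total updated as each day enters/leaves the window) and instead recomputes every 10-day window independently from its Counter, capping each distinct fruit's occurrences at its wanted amount and comparing the matched total with the total requested; B also counts zero windows when the discount list is shorter than 10 days, where A counts the partial list as a window.
-- intended difference: On discount lists shorter than 10 days that nonetheless already satisfy the wanted amounts, A returns 1 (it treats the partial list as a valid window) while B returns 0, the intended value since no 10-day membership window exists. — e.g. on solution(["a"], [1], ["a"]): A returns 1, B returns 0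
import Mathlib
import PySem

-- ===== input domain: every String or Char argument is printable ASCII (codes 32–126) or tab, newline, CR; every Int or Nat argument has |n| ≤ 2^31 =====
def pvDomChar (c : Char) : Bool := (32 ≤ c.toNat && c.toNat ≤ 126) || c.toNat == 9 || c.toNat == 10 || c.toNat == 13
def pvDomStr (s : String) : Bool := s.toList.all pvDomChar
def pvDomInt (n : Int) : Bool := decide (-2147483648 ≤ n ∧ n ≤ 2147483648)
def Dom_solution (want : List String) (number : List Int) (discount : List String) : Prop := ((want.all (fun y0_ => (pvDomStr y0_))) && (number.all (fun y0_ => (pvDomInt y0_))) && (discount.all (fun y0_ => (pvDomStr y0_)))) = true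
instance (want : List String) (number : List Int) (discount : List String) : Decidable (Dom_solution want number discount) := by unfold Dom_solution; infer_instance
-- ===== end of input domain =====

-- B recomputes every 10-day window from scratch (one capped count per wanted fruit) instead of
-- A's incremental sliding counter; on discount lists shorter than 10 days B counts zero windows
-- where A counts the partial list as one window (see D_solution below).

-- ===== PORT A =====
-- `if fruit in fruits_dict: fruits_dict[fruit] -= 1; if fruits_dict[fruit] >= 0: total_count -= 1`
def decStepA (s : PySem.Dict String Int × Int) (fruit : String) : PySem.Dict String Int × Int :=
  if s.1.contains fruit then
    let d := s.1.modify fruit 0 (· - 1)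
    (d, if 0 ≤ d.getD fruit 0 then s.2 - 1 else s.2)
  else s

-- `if out in fruits_dict: fruits_dict[out] += 1; if fruits_dict[out] > 0: total_count += 1`
def incStepA (s : PySem.Dict String Int × Int) (fruit : String) : PySem.Dict String Int × Int :=
  if s.1.contains fruit then
    let d := s.1.modify fruit 0 (· + 1)
    (d, if 0 < d.getD fruit 0 then s.2 + 1 else s.2)
  else s

-- one iteration of A's main loop, on the incoming (discount[i]) and outgoing (discount[i-10]) fruit
def slideStepA (s : PySem.Dict String Int × Int × Int) (inF outF : String) :
    PySem.Dict String Int × Int × Int :=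
  let s1 := decStepA (s.1, s.2.1) inF
  let s2 := incStepA s1 outF
  (s2.1, s2.2, if s2.2 = 0 then s.2.2 + 1 else s.2.2)

def mainStepA (discount : List String) (s : PySem.Dict String Int × Int × Int) (i : Int) :
    PySem.Dict String Int × Int × Int :=
  slideStepA s (PySem.List.pyGetD discount i "") (PySem.List.pyGetD discount (i - 10) "")

def solution (want : List String) (number : List Int) (discount : List String) : Int :=
  let s0 := (want.zip number).foldl
    (fun s p => (s.1.insert p.1 p.2, s.2 + p.2)) (PySem.Dict.empty, (0 : Int))
  let s1 := (PySem.List.slice discount none (some 10)).foldl decStepA s0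
  let answer : Int := if s1.2 = 0 then 1 else 0
  if discount.length = 10 then answer
  else ((PySem.List.pyRange 10 (discount.length : Int)).foldl
          (mainStepA discount) (s1.1, s1.2, answer)).2.2

-- ===== PORT B =====
-- matched total of one window: each distinct fruit of the window that is wanted contributes
-- its occurrence count, capped at the wanted amount (required[fruit] read under the
-- `fruit in required` guard, so getD's default is never used)
def matchedCount (required : PySem.Dict String Int) (window : List String) : Int :=
  (PySem.Dict.counter window).items.foldl
    (fun acc p =>
      if required.contains p.1 then acc + max 0 (min p.2 (required.getD p.1 0)) else acc) 0

def solution_alt (want : List String) (number : List Int) (discount : List String) : Int :=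
  let pairs := want.zip number
  let required := pairs.foldl (fun d p => d.insert p.1 p.2) PySem.Dict.empty
  let need := (pairs.map (·.2)).sum
  (PySem.List.pyRange 0 ((discount.length : Int) - 9)).foldl
    (fun answer i =>
      if matchedCount required (PySem.List.slice discount (some i) (some (i + 10))) = need
      then answer + 1 else answer) 0

-- ===== PRECONDITION & SPEC =====
-- On discount lists shorter than 10 days that nonetheless already satisfy the wanted amounts
-- (each wanted fruit, last-requested amount winning, occurs in the list at least that often,
-- adding up to the total requested), A returns 1 (it treats the partial list as a valid window)
-- while B returns 0, the intended value since no 10-day membership window exists.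
def D_solution (want : List String) (number : List Int) (discount : List String) : Prop :=
  discount.length < 10 ∧
  ((want.zip number).map (·.2)).sum =
    ((PySem.Dict.empty.update (want.zip number)).items.map
      (fun p => max 0 (min ((discount.count p.1 : Int)) p.2))).sum

instance (want : List String) (number : List Int) (discount : List String) :
    Decidable (D_solution want number discount) := by unfold D_solution; infer_instance

def Spec_solution (want : List String) (number : List Int) (discount : List String) (out : Int) : Prop :=
  ¬ D_solution want number discount → out = solution_alt want number discount
instance (want : List String) (number : List Int) (discount : List String) (out : Int) :
    Decidable (Spec_solution want number discount out) := by unfold Spec_solution; infer_instance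

def pvDiffWitness_solution : List String × List Int × List String := (["a"], [1], ["a"])
def pvDiffWitnessOut_solution : Int × Int := (1, 0)

-- ===== CLAIM (what is proved, stated in full; the proofs are below) =====
def Claim_unchanged_solution : Prop := ∀ (want : List String) (number : List Int) (discount : List String), Dom_solution want number discount → Spec_solution want number discount (solution want number discount)
def Claim_changed_solution : Prop := Dom_solution (pvDiffWitness_solution.1) (pvDiffWitness_solution.2.1) (pvDiffWitness_solution.2.2) ∧ D_solution (pvDiffWitness_solution.1) (pvDiffWitness_solution.2.1) (pvDiffWitness_solution.2.2) ∧ solution (pvDiffWitness_solution.1) (pvDiffWitness_solution.2.1) (pvDiffWitness_solution.2.2) = pvDiffWitnessOut_solution.1 ∧ solution_alt (pvDiffWitness_solution.1) (pvDiffWitness_solution.2.1) (pvDiffWitness_solution.2.2) = pvDiffWitnessOut_solution.2 ∧ pvDiffWitnessOut_solution.1 ≠ pvDiffWitnessOut_solution.2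
def Claim_exact_solution : Prop := ∀ (want : List String) (number : List Int) (discount : List String), Dom_solution want number discount → D_solution want number discount → solution want number discount ≠ solution_alt want number discount

-- ===== LEMMAS AND PROOFS =====

-- the dictionary built from zip(want, number) and the per-item matched totals
def capD (want : List String) (number : List Int) : PySem.Dict String Int :=
  (want.zip number).foldl (fun d p => d.insert p.1 p.2) PySem.Dict.empty

def term (w : List String) (p : String × Int) : Int :=
  max 0 (min ((w.count p.1 : Int)) p.2)

def mSum (ps : List (String × Int)) (w : List String) : Int := (ps.map (term w)).sum

-- dictionary-state invariant of A's sliding loop: every wanted fruit's entry is its cap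
-- minus its occurrence count in the current window w
def WInv (req : PySem.Dict String Int) (w : List String) (d : PySem.Dict String Int) : Prop :=
  ∀ f, d.get? f = (req.get? f).map (fun c => c - (w.count f : Int))

-- the successive windows A's main loop visits
def slideWins (w : List String) : List String → List (List String)
  | [] => []
  | x :: rest => (w.tail ++ [x]) :: slideWins (w.tail ++ [x]) rest

lemma modify_eq_insert (d : PySem.Dict String Int) (k : String) (d0 : Int) (f : Int → Int) :
    d.modify k d0 f = d.insert k (f (d.getD k d0)) := rfl

lemma getD_eq_get? (d : PySem.Dict String Int) (k : String) (d0 : Int) :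
    d.getD k d0 = (d.get? k).getD d0 := rfl

lemma term_succ (k : Nat) (c : Int) :
    max 0 (min ((k : Int) + 1) c) = max 0 (min (k : Int) c) + (if (k : Int) + 1 ≤ c then 1 else 0) := by
  have : (0:Int) ≤ (k:Int) := Int.natCast_nonneg k
  split_ifs with h <;> omega

lemma mSum_nil (ps : List (String × Int)) : mSum ps [] = 0 := by
  have h : ∀ x ∈ ps.map (term []), x = 0 := by
    intro x hx
    simp only [List.mem_map] at hx
    obtain ⟨p, _, rfl⟩ := hx
    simp [term]
  simp [mSum, List.sum_eq_zero h]

lemma mSum_congr (ps : List (String × Int)) (w₁ w₂ : List String)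
    (h : ∀ f, w₁.count f = w₂.count f) : mSum ps w₁ = mSum ps w₂ := by
  unfold mSum
  congr 1
  apply List.map_congr_left
  intro p _
  simp [term, h p.1]

lemma mSum_cons (ps : List (String × Int)) (x : String) (w : List String) :
    mSum ps (x :: w) = mSum ps (w ++ [x]) := by
  apply mSum_congr
  intro f
  simp [List.count_cons, List.count_append]

lemma mSum_append_notmem (ps : List (String × Int)) (w : List String) (x : String)
    (h : x ∉ ps.map (·.1)) : mSum ps (w ++ [x]) = mSum ps w := by
  unfold mSum
  congr 1
  apply List.map_congr_left
  intro p hp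
  have hne : p.1 ≠ x := fun he => h (he ▸ List.mem_map_of_mem hp)
  have hxp : x ≠ p.1 := Ne.symm hne
  simp [term, List.count_append, hxp]

lemma mSum_append_mem (ps : List (String × Int)) (w : List String) (x : String) (c : Int)
    (hnd : (ps.map (·.1)).Nodup) (hmem : (x, c) ∈ ps) :
    mSum ps (w ++ [x]) = mSum ps w + (if (w.count x : Int) + 1 ≤ c then 1 else 0) := by
  induction ps with
  | nil => simp at hmem
  | cons p rest ih =>
    simp only [List.map_cons, List.nodup_cons] at hnd
    rcases List.mem_cons.mp hmem with he | hm
    · subst he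
      have hx : x ∉ rest.map (·.1) := hnd.1
      have hrest : mSum rest (w ++ [x]) = mSum rest w := mSum_append_notmem rest w x hx
      have hterm : term (w ++ [x]) (x, c) = term w (x, c)
          + (if (w.count x : Int) + 1 ≤ c then 1 else 0) := by
        simp only [term, List.count_append, List.count_singleton]
        simpa using term_succ (w.count x) c
      simp only [mSum, List.map_cons, List.sum_cons] at *
      rw [hterm, hrest]; ring
    · have hne : p.1 ≠ x := by
        intro he
        exact hnd.1 (he ▸ List.mem_map_of_mem hm)
      have hterm : term (w ++ [x]) p = term w p := by
        have hxp : x ≠ p.1 := Ne.symm hne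
        simp [term, List.count_append, hxp]
      simp only [mSum, List.map_cons, List.sum_cons] at *
      rw [hterm, ih hnd.2 hm]; ring

lemma dec_inv (req d : PySem.Dict String Int) (tc : Int) (w : List String) (x : String)
    (hInv : WInv req w d) : WInv req (w ++ [x]) (decStepA (d, tc) x).1 := by
  unfold decStepA
  by_cases hc : d.contains x
  · intro f
    rw [if_pos hc, modify_eq_insert, PySem.Dict.get?_insert]
    by_cases hf : f = x
    · subst hf
      have hx := hInv f
      rcases ho : req.get? f with _ | c
      · rw [ho] at hx
        rw [PySem.Dict.contains_eq_isSome_get?, hx] at hc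
        simp at hc
      · rw [ho] at hx
        simp only [Option.map_some] at hx
        rw [getD_eq_get?, hx]
        simp [List.count_append]
        ring
    · simp only [hf, if_false]
      rw [hInv f]
      have hxf : x ≠ f := fun he => hf he.symm
      simp [List.count_append, hxf]
  · intro f
    rw [if_neg hc]
    rw [hInv f]
    by_cases hf : f = x
    · subst hf
      have hx := hInv f
      rcases ho : req.get? f with _ | c
      · simp
      · rw [ho] at hx
        rw [PySem.Dict.contains_eq_isSome_get?, hx] at hc
        simp at hc
    · have hxf : x ≠ f := fun he => hf he.symm
      simp [List.count_append, hxf]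

lemma dec_tc (req d : PySem.Dict String Int) (need : Int) (w : List String) (x : String)
    (hnd : req.keys.Nodup) (hInv : WInv req w d) :
    (decStepA (d, need - mSum req.items w) x).2 = need - mSum req.items (w ++ [x]) := by
  unfold decStepA
  by_cases hc : d.contains x
  · -- x is a key: req.get? x = some c
    have hsome : (req.get? x).isSome := by
      rw [PySem.Dict.contains_eq_isSome_get?] at hc
      rw [hInv x] at hc
      simpa using hc
    rcases ho : req.get? x with _ | c
    · rw [ho] at hsome; simp at hsome
    have hmem : (x, c) ∈ req.items := (PySem.Dict.get?_eq_some_iff_mem_items req x c hnd).mp ho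
    have hkeys : req.keys = req.items.map (·.1) := rfl
    have hnd' : (req.items.map (·.1)).Nodup := hkeys ▸ hnd
    rw [mSum_append_mem req.items w x c hnd' hmem]
    rw [if_pos hc]
    dsimp only
    rw [modify_eq_insert, PySem.Dict.getD_insert_self, getD_eq_get?, hInv x, ho]
    simp only [Option.map_some, Option.getD_some]
    split_ifs with h1 h2 h2 <;> omega
  · -- x not a key
    have hnone : req.get? x = none := by
      rw [PySem.Dict.contains_eq_isSome_get?] at hc
      rw [hInv x] at hc
      rcases ho : req.get? x with _ | c
      · rfl
      · rw [ho] at hc; simp at hc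
    have hnk : x ∉ req.keys := (PySem.Dict.get?_eq_none_iff_not_mem_keys req x).mp hnone
    have hkeys : req.keys = req.items.map (·.1) := rfl
    rw [mSum_append_notmem req.items w x (hkeys ▸ hnk)]
    rw [if_neg hc]

lemma inc_inv (req d : PySem.Dict String Int) (tc : Int) (w : List String) (y : String)
    (hInv : WInv req (y :: w) d) : WInv req w (incStepA (d, tc) y).1 := by
  unfold incStepA
  by_cases hc : d.contains y
  · intro f
    rw [if_pos hc, modify_eq_insert, PySem.Dict.get?_insert]
    by_cases hf : f = y
    · subst hf
      have hx := hInv f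
      rcases ho : req.get? f with _ | c
      · rw [ho] at hx
        rw [PySem.Dict.contains_eq_isSome_get?, hx] at hc
        simp at hc
      · rw [ho] at hx
        simp only [Option.map_some] at hx
        rw [getD_eq_get?, hx]
        simp [List.count_cons_self]
        ring
    · simp only [hf, if_false]
      rw [hInv f]
      have hxf : y ≠ f := fun he => hf he.symm
      simp [hxf]
  · intro f
    rw [if_neg hc, hInv f]
    by_cases hf : f = y
    · subst hf
      have hx := hInv f
      rcases ho : req.get? f with _ | c
      · simp
      · rw [ho] at hx
        rw [PySem.Dict.contains_eq_isSome_get?, hx] at hc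
        simp at hc
    · have hxf : y ≠ f := fun he => hf he.symm
      simp [hxf]

lemma inc_tc (req d : PySem.Dict String Int) (need : Int) (w : List String) (y : String)
    (hnd : req.keys.Nodup) (hInv : WInv req (y :: w) d) :
    (incStepA (d, need - mSum req.items (y :: w)) y).2 = need - mSum req.items w := by
  unfold incStepA
  by_cases hc : d.contains y
  · have hsome : (req.get? y).isSome := by
      rw [PySem.Dict.contains_eq_isSome_get?] at hc
      rw [hInv y] at hc
      simpa using hc
    rcases ho : req.get? y with _ | c
    · rw [ho] at hsome; simp at hsome
    have hmem : (y, c) ∈ req.items := (PySem.Dict.get?_eq_some_iff_mem_items req y c hnd).mp ho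
    have hkeys : req.keys = req.items.map (·.1) := rfl
    have hnd' : (req.items.map (·.1)).Nodup := hkeys ▸ hnd
    rw [mSum_cons, mSum_append_mem req.items w y c hnd' hmem]
    rw [if_pos hc]
    dsimp only
    rw [modify_eq_insert, PySem.Dict.getD_insert_self, getD_eq_get?, hInv y, ho]
    simp only [Option.map_some, Option.getD_some, List.count_cons_self]
    split_ifs with h1 h2 h2 <;> push_cast at * <;> omega
  · have hnone : req.get? y = none := by
      rw [PySem.Dict.contains_eq_isSome_get?] at hc
      rw [hInv y] at hc
      rcases ho : req.get? y with _ | c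
      · rfl
      · rw [ho] at hc; simp at hc
    have hnk : y ∉ req.keys := (PySem.Dict.get?_eq_none_iff_not_mem_keys req y).mp hnone
    have hkeys : req.keys = req.items.map (·.1) := rfl
    rw [mSum_cons, mSum_append_notmem req.items w y (hkeys ▸ hnk)]
    rw [if_neg hc]

lemma first_loop (req : PySem.Dict String Int) (need : Int) (hnd : req.keys.Nodup) :
    ∀ (ws w : List String) (d : PySem.Dict String Int), WInv req w d →
      WInv req (w ++ ws) (ws.foldl decStepA (d, need - mSum req.items w)).1 ∧
      (ws.foldl decStepA (d, need - mSum req.items w)).2 = need - mSum req.items (w ++ ws) := by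
  intro ws
  induction ws with
  | nil =>
    intro w d hInv
    refine ⟨?_, by simp⟩
    simpa using hInv
  | cons a ws ih =>
    intro w d hInv
    have h1 : WInv req (w ++ [a]) (decStepA (d, need - mSum req.items w) a).1 :=
      dec_inv req d _ w a hInv
    have h2 : (decStepA (d, need - mSum req.items w) a).2 = need - mSum req.items (w ++ [a]) :=
      dec_tc req d need w a hnd hInv
    have heta : decStepA (d, need - mSum req.items w) a
        = ((decStepA (d, need - mSum req.items w) a).1, need - mSum req.items (w ++ [a])) := by
      rw [← h2]
    have hres := ih (w ++ [a]) (decStepA (d, need - mSum req.items w) a).1 h1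
    rw [List.foldl_cons, heta, show w ++ a :: ws = (w ++ [a]) ++ ws from by simp]
    exact hres

lemma main_loop (req : PySem.Dict String Int) (need : Int) (hnd : req.keys.Nodup) :
    ∀ (inc w : List String) (d : PySem.Dict String Int) (ans : Int), w ≠ [] → WInv req w d →
      ((inc.zip (w ++ inc)).foldl (fun s p => slideStepA s p.1 p.2)
          (d, need - mSum req.items w, ans)).2.2
        = ans + ((slideWins w inc).countP (fun v => decide (mSum req.items v = need)) : Int) := by
  intro inc
  induction inc with
  | nil => intro w d ans hw hInv; simp [slideWins]
  | cons x rest ih =>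
    intro w d ans hw hInv
    obtain ⟨y, t, rfl⟩ : ∃ y t, w = y :: t := by
      cases w with
      | nil => exact absurd rfl hw
      | cons y t => exact ⟨y, t, rfl⟩
    -- the zip: ((x, y) :: rest.zip ((t ++ [x]) ++ rest))
    have hzip : (x :: rest).zip ((y :: t) ++ (x :: rest))
        = (x, y) :: rest.zip ((t ++ [x]) ++ rest) := by
      simp [List.zip]
    rw [hzip, List.foldl_cons]
    -- evaluate one slideStepA
    have hd1 : WInv req ((y :: t) ++ [x])
        (decStepA (d, need - mSum req.items (y :: t)) x).1 :=
      dec_inv req d _ (y :: t) x hInv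
    have ht1 : (decStepA (d, need - mSum req.items (y :: t)) x).2
        = need - mSum req.items ((y :: t) ++ [x]) :=
      dec_tc req d need (y :: t) x hnd hInv
    have hcons : (y :: t) ++ [x] = y :: (t ++ [x]) := rfl
    have hd2 : WInv req (t ++ [x])
        (incStepA (decStepA (d, need - mSum req.items (y :: t)) x) y).1 := by
      have := inc_inv req (decStepA (d, need - mSum req.items (y :: t)) x).1
        (decStepA (d, need - mSum req.items (y :: t)) x).2 (t ++ [x]) y (by rw [← hcons]; exact hd1)
      simpa using this
    have ht2 : (incStepA (decStepA (d, need - mSum req.items (y :: t)) x) y).2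
        = need - mSum req.items (t ++ [x]) := by
      have hpair : decStepA (d, need - mSum req.items (y :: t)) x
          = ((decStepA (d, need - mSum req.items (y :: t)) x).1,
             need - mSum req.items (y :: (t ++ [x]))) := by
        rw [← hcons, ← ht1]
      rw [hpair]
      exact inc_tc req _ need (t ++ [x]) y hnd (by rw [← hcons]; exact hd1)
    have hstep : slideStepA (d, need - mSum req.items (y :: t), ans) x y
        = ((incStepA (decStepA (d, need - mSum req.items (y :: t)) x) y).1,
           need - mSum req.items (t ++ [x]),
           if need - mSum req.items (t ++ [x]) = 0 then ans + 1 else ans) := by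
      unfold slideStepA
      dsimp only
      rw [ht2]
    rw [hstep]
    have hres := ih (t ++ [x]) _ (if need - mSum req.items (t ++ [x]) = 0 then ans + 1 else ans)
      (by simp) hd2
    rw [hres]
    -- counting side
    have hwins : slideWins (y :: t) (x :: rest) = (t ++ [x]) :: slideWins (t ++ [x]) rest := rfl
    rw [hwins, List.countP_cons]
    by_cases hm : mSum req.items (t ++ [x]) = need
    · rw [if_pos (by omega : need - mSum req.items (t ++ [x]) = 0)]
      simp only [hm, decide_true]
      push_cast
      ring
    · rw [if_neg (by omega : ¬ need - mSum req.items (t ++ [x]) = 0)]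
      simp only [hm, decide_false]
      push_cast
      ring

lemma slideWins_eq (len : Nat) :
    ∀ (inc w : List String), w ≠ [] → w.length = len →
      slideWins w inc
        = (List.range inc.length).map (fun k => (((w ++ inc).drop (k + 1)).take len)) := by
  intro inc
  induction inc with
  | nil => intro w hw hl; simp [slideWins]
  | cons x rest ih =>
    intro w hw hl
    obtain ⟨y, t, rfl⟩ : ∃ y t, w = y :: t := by
      cases w with
      | nil => exact absurd rfl hw
      | cons y t => exact ⟨y, t, rfl⟩
    have hlen : (t ++ [x]).length = len := by
      simp at hl ⊢
      omega
    have hdrop1 : ((y :: t) ++ (x :: rest)).drop 1 = (t ++ [x]) ++ rest := by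
      simp
    show ((t ++ [x]) :: slideWins (t ++ [x]) rest) = _
    rw [ih (t ++ [x]) (by simp) hlen]
    have hlr : (x :: rest).length = rest.length + 1 := by simp
    rw [hlr, List.range_succ_eq_map, List.map_cons, List.map_map]
    congr 1
    · -- head window
      rw [show (0:Nat) + 1 = 1 from rfl, hdrop1]
      rw [List.take_append]
      have h1 : (t ++ [x]).length = len := hlen
      rw [show len - (t ++ [x]).length = 0 from by omega]
      rw [List.take_of_length_le (by omega), List.take_zero, List.append_nil]
    · apply List.map_congr_left
      intro k _
      simp only [Function.comp]
      have : ((y :: t) ++ (x :: rest)).drop (Nat.succ k + 1)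
           = (((t ++ [x]) ++ rest).drop (k + 1)) := by
        rw [← hdrop1, List.drop_drop]
        congr 1
        omega
      rw [this]

lemma bridge (discount : List String) :
    ∀ (m k : Nat) (s : PySem.Dict String Int × Int × Int), 10 ≤ k → k + m = discount.length →
      (PySem.List.pyRange (k : Int) (discount.length : Int)).foldl (mainStepA discount) s
        = ((discount.drop k).zip (discount.drop (k - 10))).foldl
            (fun s p => slideStepA s p.1 p.2) s := by
  intro m
  induction m with
  | zero =>
    intro k s h10 hk
    have hk' : k = discount.length := by omega
    rw [PySem.List.pyRange_one_eq_nil (by omega)]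
    rw [hk', List.drop_length]
    simp
  | succ m ih =>
    intro k s h10 hk
    have hklt : k < discount.length := by omega
    rw [PySem.List.pyRange_one_cons (by exact_mod_cast hklt)]
    rw [List.foldl_cons]
    have hget1 : PySem.List.pyGetD discount (k : Int) "" = discount[k] := by
      rw [PySem.List.pyGetD_natCast]
      exact List.getD_eq_getElem discount "" hklt
    have hcast : (k : Int) - 10 = ((k - 10 : Nat) : Int) := by omega
    have hlt2 : k - 10 < discount.length := by omega
    have hget2 : PySem.List.pyGetD discount ((k : Int) - 10) "" = discount[k - 10] := by
      rw [hcast, PySem.List.pyGetD_natCast]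
      exact List.getD_eq_getElem discount "" hlt2
    have hstep : mainStepA discount s (k : Int) = slideStepA s discount[k] discount[k-10] := by
      unfold mainStepA
      rw [hget1, hget2]
    rw [hstep]
    have hdk : discount.drop k = discount[k] :: discount.drop (k + 1) :=
      List.drop_eq_getElem_cons hklt
    have hdk10 : discount.drop (k - 10) = discount[k-10] :: discount.drop (k - 10 + 1) :=
      List.drop_eq_getElem_cons hlt2
    rw [hdk, hdk10]
    simp only [List.zip_cons_cons, List.foldl_cons]
    have hc2 : (k : Int) + 1 = ((k + 1 : Nat) : Int) := by omega
    have hsub : k - 10 + 1 = (k + 1) - 10 := by omega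
    rw [hsub]
    have := ih (k + 1) (slideStepA s discount[k] discount[k-10]) (by omega) (by omega)
    rw [hc2]
    exact this

lemma nodup_keys_capD (want : List String) (number : List Int) :
    (capD want number).keys.Nodup := by
  exact PySem.Dict.nodup_keys_foldl_insert_key (want.zip number) (·.1) (fun _ p => p.2)
    PySem.Dict.empty (by simp [PySem.Dict.keys_empty])

lemma matchedCount_eq (req : PySem.Dict String Int) (w : List String)
    (hnd : req.keys.Nodup) : matchedCount req w = mSum req.items w := by
  unfold matchedCount mSum
  rw [PySem.Dict.items_counter]
  -- turn the guarded foldl into a sum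
  have hsplit : ∀ (acc : Int) (p : String × Int),
      (if req.contains p.1 then acc + max 0 (min p.2 (req.getD p.1 0)) else acc)
      = acc + (if req.contains p.1 then max 0 (min p.2 (req.getD p.1 0)) else 0) := by
    intro acc p
    split_ifs <;> ring
  simp only [hsplit]
  rw [PySem.List.foldl_add]
  rw [zero_add, List.map_map]
  rw [PySem.Dict.items_eq_map_keys req hnd 0, List.map_map]
  simp only [Function.comp_def]
  rw [← List.sum_toFinset _ (PySem.Set.nodup_ofList w), ← List.sum_toFinset _ hnd]
  have hterm : ∀ x : String, term w (x, req.getD x 0)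
      = max 0 (min ((w.count x : Int)) (req.getD x 0)) := fun x => rfl
  simp only [hterm]
  have hguard : ∀ x : String,
      (if req.contains x then max 0 (min ((w.count x : Int)) (req.getD x 0)) else 0)
      = (if x ∈ (req.keys).toFinset then max 0 (min ((w.count x : Int)) (req.getD x 0)) else 0) := by
    intro x
    rw [PySem.Dict.contains_eq_decide_mem_keys]
    simp [List.mem_toFinset]
  simp only [hguard]
  rw [← Finset.sum_filter]
  rw [Finset.filter_mem_eq_inter]
  apply Finset.sum_subset Finset.inter_subset_right
  intro x hx hnx
  have hxw : x ∉ w := by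
    intro hxw
    exact hnx (Finset.mem_inter.mpr ⟨List.mem_toFinset.mpr ((PySem.Set.mem_ofList w x).mpr hxw), hx⟩)
  have : w.count x = 0 := List.count_eq_zero.mpr hxw
  rw [this]
  have h0 : ((0:Nat):Int) = 0 := rfl
  rw [h0]
  omega

lemma D_sum_eq (want : List String) (number : List Int) (discount : List String) :
    ((PySem.Dict.empty.update (want.zip number)).items.map
      (fun p => max 0 (min ((discount.count p.1 : Int)) p.2))).sum
    = mSum (capD want number).items discount := rfl

lemma first_state (want : List String) (number : List Int) :
    ((want.zip number).foldl (fun s p => (s.1.insert p.1 p.2, s.2 + p.2))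
      (PySem.Dict.empty, (0 : Int)))
    = (capD want number, ((want.zip number).map (·.2)).sum) := by
  rw [PySem.List.foldl_prod_mk (fun d (p : String × Int) => d.insert p.1 p.2)
        (fun a (p : String × Int) => a + p.2) (want.zip number) PySem.Dict.empty 0]
  rw [PySem.List.foldl_add (want.zip number) (·.2) 0]
  rw [capD]
  ring_nf

lemma s1_spec (want : List String) (number : List Int) (discount : List String) :
    WInv (capD want number) (discount.take 10)
      ((discount.take 10).foldl decStepA
        (capD want number, ((want.zip number).map (·.2)).sum)).1
  ∧ ((discount.take 10).foldl decStepA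
        (capD want number, ((want.zip number).map (·.2)).sum)).2
      = ((want.zip number).map (·.2)).sum - mSum (capD want number).items (discount.take 10) := by
  have h0 : WInv (capD want number) [] (capD want number) := by
    intro f
    rcases (capD want number).get? f with _ | c <;> simp
  have hpair : (capD want number, ((want.zip number).map (·.2)).sum)
      = (capD want number, ((want.zip number).map (·.2)).sum
          - mSum (capD want number).items []) := by
    rw [mSum_nil]; ring_nf
  rw [hpair]
  have := first_loop (capD want number) (((want.zip number).map (·.2)).sum)
    (nodup_keys_capD want number) (discount.take 10) [] (capD want number) h0
  simpa using this

-- A's value for any discount list of length ≥ 10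
lemma A_eq_countP (want : List String) (number : List Int) (discount : List String)
    (h : 10 ≤ discount.length) :
    solution want number discount
      = ((List.range (discount.length - 9)).countP
          (fun k => decide (mSum (capD want number).items ((discount.drop k).take 10)
                      = ((want.zip number).map (·.2)).sum)) : Int) := by
  -- abbreviations
  set req := capD want number with hreq
  set needv := ((want.zip number).map (·.2)).sum with hneedv
  set W0 := discount.take 10 with hW0
  set inc := discount.drop 10 with hinc
  have hnd := nodup_keys_capD want number
  have hW0len : W0.length = 10 := by
    rw [hW0, List.length_take]
    omega
  have hW0ne : W0 ≠ [] := by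
    intro he
    rw [he] at hW0len
    simp at hW0len
  have hsplit : W0 ++ inc = discount := List.take_append_drop 10 discount
  have hinclen : inc.length = discount.length - 10 := by
    rw [hinc, List.length_drop]
  -- evaluate the first loop
  unfold solution
  dsimp only
  rw [PySem.List.slice_to discount (by norm_num : (0:Int) ≤ 10)]
  rw [show ((10:Int)).toNat = 10 from rfl]
  rw [first_state, ← hreq, ← hneedv, ← hW0]
  have hs1 := s1_spec want number discount
  rw [← hreq, ← hneedv, ← hW0] at hs1
  obtain ⟨hInv1, htc1⟩ := hs1
  -- the predicate at window starting at k
  set P : Nat → Bool :=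
    fun k => decide (mSum req.items ((discount.drop k).take 10) = needv) with hP
  have hP0 : (if (W0.foldl decStepA (req, needv)).2 = 0 then (1:Int) else 0)
      = if P 0 then 1 else 0 := by
    rw [htc1, hP]
    simp only [List.drop_zero, ← hW0]
    split_ifs with h1 h2 h2 <;> simp at * <;> omega
  by_cases hlen : discount.length = 10
  · rw [if_pos hlen, hP0, hlen]
    rw [show (10:Nat) - 9 = 1 from rfl, List.range_one, List.countP_cons, List.countP_nil]
    split_ifs <;> simp
  · rw [if_neg hlen]
    have hbr := bridge discount (discount.length - 10) 10
      ((W0.foldl decStepA (req, needv)).1, (W0.foldl decStepA (req, needv)).2,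
        if (W0.foldl decStepA (req, needv)).2 = 0 then (1:Int) else 0) (by omega) (by omega)
    norm_num at hbr
    rw [hbr]
    rw [show ((List.drop 10 discount).zip discount)
         = inc.zip (W0 ++ inc) from by rw [hsplit, hinc]]
    have hstate : ((W0.foldl decStepA (req, needv)).1, (W0.foldl decStepA (req, needv)).2,
          if (W0.foldl decStepA (req, needv)).2 = 0 then (1:Int) else 0)
        = ((W0.foldl decStepA (req, needv)).1, needv - mSum req.items W0,
            if P 0 then (1:Int) else 0) := by
      rw [← hP0, ← htc1]
    rw [hstate]
    rw [main_loop req needv hnd inc W0 _ _ hW0ne hInv1]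
    rw [slideWins_eq 10 inc W0 hW0ne hW0len, hsplit, hinclen]
    rw [List.countP_map]
    have hrange : discount.length - 9 = (discount.length - 10) + 1 := by omega
    rw [hrange, List.range_succ_eq_map, List.countP_cons, List.countP_map]
    have hcomp : ∀ k, ((fun v => decide (mSum req.items v = needv)) ∘
          (fun k => List.take 10 (discount.drop (k + 1)))) k = (P ∘ Nat.succ) k := by
      intro k
      simp [hP, Function.comp]
    rw [List.countP_congr (fun k _ => by rw [hcomp k])]
    push_cast
    split_ifs with h1 <;> ring

-- B's value for any discount list of length ≥ 10
lemma B_eq_countP (want : List String) (number : List Int) (discount : List String)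
    (h : 10 ≤ discount.length) :
    solution_alt want number discount
      = ((List.range (discount.length - 9)).countP
          (fun k => decide (mSum (capD want number).items ((discount.drop k).take 10)
                      = ((want.zip number).map (·.2)).sum)) : Int) := by
  unfold solution_alt
  dsimp only
  rw [show (discount.length : Int) - 9 = ((discount.length - 9 : Nat) : Int) from by omega]
  rw [PySem.List.pyRange_zero_natCast (discount.length - 9)]
  rw [List.foldl_map]
  rw [PySem.List.foldl_ite_add_one
    (fun k : Nat => matchedCount ((want.zip number).foldl (fun d p => d.insert p.1 p.2) PySem.Dict.empty)
        (PySem.List.slice discount (some (k : Int)) (some ((k : Int) + 10)))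
      = ((want.zip number).map (·.2)).sum)
    (List.range (discount.length - 9)) 0]
  rw [zero_add]
  congr 1
  apply List.countP_congr
  intro k _
  have hslice : PySem.List.slice discount (some (k : Int)) (some ((k : Int) + 10))
      = (discount.drop k).take 10 := by
    have := PySem.List.slice_natCast_add discount k 10
    simpa using this
  rw [hslice, ← capD, matchedCount_eq _ _ (nodup_keys_capD want number)]

lemma B_small (want : List String) (number : List Int) (discount : List String)
    (h : discount.length < 10) : solution_alt want number discount = 0 := by
  unfold solution_alt
  rw [PySem.List.pyRange_one_eq_nil (by exact_mod_cast (by omega : (discount.length : Int) - 9 ≤ 0))]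
  rfl

lemma A_small (want : List String) (number : List Int) (discount : List String)
    (h : discount.length < 10) :
    solution want number discount
      = if mSum (capD want number).items discount = ((want.zip number).map (·.2)).sum
        then 1 else 0 := by
  unfold solution
  dsimp only
  rw [PySem.List.slice_to discount (by norm_num : (0:Int) ≤ 10)]
  rw [show ((10:Int)).toNat = 10 from rfl]
  rw [first_state]
  have hs := (s1_spec want number discount).2
  have htake : discount.take 10 = discount := List.take_of_length_le (by omega)
  rw [if_neg (by omega : ¬ discount.length = 10)]
  rw [PySem.List.pyRange_one_eq_nil (by exact_mod_cast (by omega : (discount.length : Int) ≤ 10))]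
  rw [List.foldl_nil]
  dsimp only
  rw [hs, htake]
  split_ifs with h1 h2 h2 <;> omega

-- ===== VERDICT (by name: the statement is the Claim_ definition above) =====
theorem solution_spec : Claim_unchanged_solution := by
  intro want number discount hdom hD
  by_cases h : 10 ≤ discount.length
  · rw [A_eq_countP want number discount h, B_eq_countP want number discount h]
  · have h' : discount.length < 10 := by omega
    rw [B_small want number discount h', A_small want number discount h']
    rw [if_neg]
    intro hm
    exact hD ⟨h', by rw [D_sum_eq]; exact hm.symm⟩

theorem solution_changed : Claim_changed_solution := by
  unfold Claim_changed_solution; decide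

theorem solution_tight : Claim_exact_solution := by
  intro want number discount hdom hD
  obtain ⟨hlen, hsum⟩ := hD
  rw [B_small want number discount hlen, A_small want number discount hlen]
  rw [if_pos (by rw [← D_sum_eq]; exact hsum.symm)]
  decide
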